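-- pv_equiv track=rewrite | github.com/aceiii/advent-of-code-2022 | python/day03.py | part2
-- ===== SOURCE A (Python) =====
-- import string
-- from collections import defaultdict
--
-- def priority(letter):
--     return string.ascii_letters.find(letter) + 1
--
-- def grouped(lines, count):
--     group = []
--     for line in lines:
--         group.append(line)
--         if len(group) == count:
--             yield group
--             group = []
--     if len(group):
--         yield group
--
-- def part2(lines):
--     total = 0
--     for group in grouped(map(str.strip, lines), 3):
--         if len(group) < 3:
--             continue
--         counts = defaultdict(lambda: 0)
--         for (idx, line) in enumerate(group):
--             for letter in line:
--                 counts[letter] |= 2**idx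
--         found = [c for c in counts if counts[c] == 7][0]
--         total += priority(found)
--
--     return total
-- ===== SOURCE B (Python) =====
-- import string
--
-- def priority(letter):
--     return string.ascii_letters.find(letter) + 1
--
-- def part2(lines):
--     total = 0
--     stripped = [line.strip() for line in lines]
--     for i in range(0, len(stripped) - len(stripped) % 3, 3):
--         a, b, c = stripped[i:i + 3]
--         common = set(a) & set(b) & set(c)
--         total += priority(next(ch for ch in a + b + c if ch in common))
--     return total
-- ===== Notes on version B (the rewrite author's own statement) =====
-- stated objective: idiomatic
-- what changed: Replaces the per-letter bitmask dict (OR-ing 2**idx per line, then scanning keys for value 7) with set intersection of the three lines, picking the common letter as the first match in the concatenated group; the generator-based grouping is replaced by direct slicing in steps of 3.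
import Mathlib
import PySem

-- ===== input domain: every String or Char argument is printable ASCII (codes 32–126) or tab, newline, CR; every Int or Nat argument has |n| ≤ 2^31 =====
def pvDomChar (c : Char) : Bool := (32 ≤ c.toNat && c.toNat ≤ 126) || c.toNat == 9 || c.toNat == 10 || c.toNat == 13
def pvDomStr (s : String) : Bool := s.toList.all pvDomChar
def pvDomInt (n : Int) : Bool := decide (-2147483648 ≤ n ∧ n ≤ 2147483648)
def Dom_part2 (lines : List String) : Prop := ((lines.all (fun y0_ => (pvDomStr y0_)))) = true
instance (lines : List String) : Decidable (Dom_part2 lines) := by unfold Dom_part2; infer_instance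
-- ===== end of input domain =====

-- B replaces A's per-letter bitmask dictionary + value-7 key scan with set intersection of the
-- three lines and a first-match scan of the concatenation (objective: more idiomatic).

-- shared helper: string.ascii_letters.find(letter) + 1
def pvAsciiLetters : List Char := "abcdefghijklmnopqrstuvwxyzABCDEFGHIJKLMNOPQRSTUVWXYZ".toList
def pvPriority (c : Char) : Int := PySem.Chars.find pvAsciiLetters [c] + 1

-- ===== PORT A =====
-- generator 'grouped(lines, 3)': accumulate into 'group', yield on length 3, yield leftovers
def groupedA : List (List Char) → List (List Char) → List (List (List Char))
  | [], group => if group.length ≠ 0 then [group] else []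
  | line :: rest, group =>
      let g := group ++ [line]
      if g.length = 3 then g :: groupedA rest [] else groupedA rest g

def part2 (lines : List String) : Int :=
  (groupedA (lines.map (fun s => PySem.Chars.strip s.toList)) []).foldl
    (fun total group =>
      if group.length < 3 then total
      else
        -- counts[letter] |= 2**idx over enumerate(group)
        let counts := (PySem.List.enumerate group).foldl
          (fun counts (p : Int × List Char) =>
            p.2.foldl (fun counts letter =>
              counts.modify letter 0 (fun v => PySem.Int.bor v (2 ^ p.1.toNat))) counts)
          PySem.Dict.empty
        -- found = [c for c in counts if counts[c] == 7][0]   (IndexError when absent: excluded by Pre_)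
        match (counts.keys.filter (fun ch => counts.getD ch 0 == 7)).head? with
        | some ch => total + pvPriority ch
        | none => total)
    0

-- ===== PORT B =====
-- loop over stripped[i:i+3] in steps of 3 (short tail never reached by the range)
def part2AltGo : List (List Char) → Int
  | a :: b :: c :: rest =>
      let common := PySem.Set.inter (PySem.Set.inter (PySem.Set.ofList a) b) c
      -- next(ch for ch in a + b + c if ch in common)   (StopIteration when absent: excluded by Pre_)
      (match (a ++ b ++ c).find? (fun ch => PySem.Set.contains common ch) with
       | some ch => pvPriority ch
       | none => 0) + part2AltGo rest
  | _ => 0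

def part2_alt (lines : List String) : Int :=
  part2AltGo (lines.map (fun s => PySem.Chars.strip s.toList))

-- ===== PRECONDITION & SPEC =====
-- Pre_ excludes inputs where some full triple of stripped lines shares no character:
-- there A raises IndexError (and B raises StopIteration).
def Pre_part2 (lines : List String) : Prop :=
  ((List.range ((lines.map (fun s => PySem.Chars.strip s.toList)).length / 3)).all (fun i =>
    ((lines.map (fun s => PySem.Chars.strip s.toList)).getD (3 * i) []).any (fun ch =>
      ((lines.map (fun s => PySem.Chars.strip s.toList)).getD (3 * i + 1) []).contains ch &&
      ((lines.map (fun s => PySem.Chars.strip s.toList)).getD (3 * i + 2) []).contains ch))) = true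
instance (lines : List String) : Decidable (Pre_part2 lines) := by unfold Pre_part2; infer_instance

def pvWitness_part2 : List String := ["ab", " bc ", "bd", "x"]

def Spec_part2 (lines : List String) (out : Int) : Prop := out = part2_alt lines
instance (lines : List String) (out : Int) : Decidable (Spec_part2 lines out) := by unfold Spec_part2; infer_instance

-- ===== CLAIM (what is proved, stated in full; the proofs are below) =====
def Claim_equal_part2 : Prop := ∀ (lines : List String), Dom_part2 lines → Pre_part2 lines → Spec_part2 lines (part2 lines)

-- ===== LEMMAS AND PROOFS =====

theorem pv_bor_nonneg (v m : Int) (hv : 0 ≤ v) (hm : 0 ≤ m) : 0 ≤ PySem.Int.bor v m := by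
  rw [PySem.Int.bor_of_nonneg hv hm]; positivity

theorem pv_bor_idem (v m : Int) (hv : 0 ≤ v) (hm : 0 ≤ m) :
    PySem.Int.bor (PySem.Int.bor v m) m = PySem.Int.bor v m := by
  rw [PySem.Int.bor_of_nonneg hv hm, PySem.Int.bor_of_nonneg (by positivity) hm]
  norm_num [Nat.or_assoc]

/-- one line's inner loop: OR the mask `m` into every char of `l` -/
theorem pv_fold_getD (m : Int) (hm : 0 ≤ m) (l : List Char) :
    ∀ (d : PySem.Dict Char Int), (∀ k, 0 ≤ d.getD k 0) → ∀ k,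
      (l.foldl (fun d x => d.modify x 0 (fun v => PySem.Int.bor v m)) d).getD k 0 =
        if k ∈ l then PySem.Int.bor (d.getD k 0) m else d.getD k 0 := by
  induction l with
  | nil => intro d _ k; simp
  | cons x xs ih =>
    intro d hd k
    have hd' : ∀ k, 0 ≤ (d.modify x 0 (fun v => PySem.Int.bor v m)).getD k 0 := by
      intro j
      rw [PySem.Dict.getD_modify]
      split_ifs
      · exact pv_bor_nonneg _ _ (hd _) hm
      · exact hd _
    rw [List.foldl_cons, ih _ hd' k, PySem.Dict.getD_modify]
    by_cases hxs : k ∈ xs <;> by_cases hkx : k = x <;>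
      simp [hxs, hkx, pv_bor_idem _ _ (hd _) hm]

theorem pv_fold_nonneg (m : Int) (hm : 0 ≤ m) (l : List Char)
    (d : PySem.Dict Char Int) (hd : ∀ k, 0 ≤ d.getD k 0) :
    ∀ k, 0 ≤ (l.foldl (fun d x => d.modify x 0 (fun v => PySem.Int.bor v m)) d).getD k 0 := by
  intro k
  rw [pv_fold_getD m hm l d hd k]
  split_ifs
  · exact pv_bor_nonneg _ _ (hd _) hm
  · exact hd _

/-- find? over a Python-set update: first hit in s, else first hit in the added list -/
theorem pv_find_update (p : Char → Bool) (l : List Char) :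
    ∀ s : PySem.Set Char, (PySem.Set.update s l).find? p = (s.find? p).or (l.find? p) := by
  induction l with
  | nil => intro s; simp [PySem.Set.update]
  | cons x xs ih =>
    intro s
    rw [PySem.Set.update_cons, ih]
    by_cases hc : PySem.Set.contains s x
    · have hm := (PySem.Set.contains_iff s x).mp hc
      have hsx : PySem.Set.add s x = s := by simp [PySem.Set.add, hm]
      rw [hsx]
      cases hfs : s.find? p with
      | some y => simp
      | none =>
        have hpx : p x = false := by
          have := List.find?_eq_none.mp hfs x hm
          simpa using this
        simp [hpx]
    · have hm : x ∉ s := fun m => hc ((PySem.Set.contains_iff s x).mpr m)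
      have hsx : PySem.Set.add s x = s ++ [x] := by simp [PySem.Set.add, hm]
      rw [hsx, List.find?_append]
      cases hfs : s.find? p with
      | some y => simp
      | none =>
        simp [List.find?_cons]
        cases p x <;> simp

theorem pv_find_ofList (p : Char → Bool) (l : List Char) :
    (PySem.Set.ofList l).find? p = l.find? p := by
  rw [← PySem.Set.update_nil_left, pv_find_update]
  simp

/-- A's step applied to a full triple equals B's per-chunk value added to the total -/
theorem pv_step (a b c : List Char) (t : Int) :
    (if ([a, b, c] : List (List Char)).length < 3 then t
     else
       let counts := (PySem.List.enumerate [a, b, c]).foldl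
         (fun counts (p : Int × List Char) =>
           p.2.foldl (fun counts letter =>
             counts.modify letter 0 (fun v => PySem.Int.bor v (2 ^ p.1.toNat))) counts)
         PySem.Dict.empty
       match (counts.keys.filter (fun ch => counts.getD ch 0 == 7)).head? with
       | some ch => t + pvPriority ch
       | none => t) =
    t + (match (a ++ b ++ c).find? (fun ch =>
           PySem.Set.contains (PySem.Set.inter (PySem.Set.inter (PySem.Set.ofList a) b) c) ch) with
         | some ch => pvPriority ch
         | none => 0) := by
  rw [if_neg (by simp)]
  simp only [PySem.List.enumerate_cons, PySem.List.enumerate_nil, List.foldl_cons, List.foldl_nil]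
  norm_num
  simp only [show ((2:Int) ^ Int.toNat 2) = 4 by decide]
  set d1 := List.foldl (fun counts letter => counts.modify letter 0 fun v => PySem.Int.bor v 1)
      PySem.Dict.empty a with hd1
  set d2 := List.foldl (fun counts letter => counts.modify letter 0 fun v => PySem.Int.bor v 2) d1 b with hd2
  set d3 := List.foldl (fun counts letter => counts.modify letter 0 fun v => PySem.Int.bor v 4) d2 c with hd3
  have he : ∀ k : Char, 0 ≤ (PySem.Dict.empty : PySem.Dict Char Int).getD k 0 := by
    intro k; simp
  have n1 : ∀ k, 0 ≤ d1.getD k 0 := by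
    rw [hd1]; exact pv_fold_nonneg 1 (by norm_num) a PySem.Dict.empty he
  have n2 : ∀ k, 0 ≤ d2.getD k 0 := by
    rw [hd2]; exact pv_fold_nonneg 2 (by norm_num) b d1 n1
  have h1 := pv_fold_getD 1 (by norm_num) a PySem.Dict.empty he
  have h2 := pv_fold_getD 2 (by norm_num) b d1 n1
  have h4 := pv_fold_getD 4 (by norm_num) c d2 n2
  have hP : (fun ch => d3.getD ch 0 == (7 : Int)) =
      (fun ch => decide (ch ∈ a) && decide (ch ∈ b) && decide (ch ∈ c)) := by
    funext ch
    rw [hd3, h4 ch, hd2, h2 ch, hd1, h1 ch]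
    by_cases ha : ch ∈ a <;> by_cases hb : ch ∈ b <;> by_cases hc : ch ∈ c <;>
      simp [ha, hb, hc] <;> decide
  have hkeys : d3.keys = PySem.Set.ofList (a ++ b ++ c) := by
    rw [hd3, hd2, hd1]
    simp only [PySem.Dict.keys_foldl_modify, PySem.Dict.keys_empty]
    rw [← PySem.Set.update_append, ← PySem.Set.update_append, PySem.Set.update_nil_left,
      List.append_assoc]
  rw [hP, hkeys, pv_find_ofList]
  simp only [List.find?_append]
  rw [Option.or_assoc]
  cases (List.find? (fun ch => decide (ch ∈ a) && decide (ch ∈ b) && decide (ch ∈ c)) a).or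
      ((List.find? (fun ch => decide (ch ∈ a) && decide (ch ∈ b) && decide (ch ∈ c)) b).or
        (List.find? (fun ch => decide (ch ∈ a) && decide (ch ∈ b) && decide (ch ∈ c)) c)) with
  | some ch => simp
  | none => simp

theorem pv_grouped_cons3 (a b c : List Char) (rest : List (List Char)) :
    groupedA (a :: b :: c :: rest) [] = [a, b, c] :: groupedA rest [] := by
  simp [groupedA]

theorem pv_main (ls : List (List Char)) : ∀ (t : Int),
    (groupedA ls []).foldl
      (fun total group =>
        if group.length < 3 then total
        else
          let counts := (PySem.List.enumerate group).foldl
            (fun counts (p : Int × List Char) =>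
              p.2.foldl (fun counts letter =>
                counts.modify letter 0 (fun v => PySem.Int.bor v (2 ^ p.1.toNat))) counts)
            PySem.Dict.empty
          match (counts.keys.filter (fun ch => counts.getD ch 0 == 7)).head? with
          | some ch => total + pvPriority ch
          | none => total)
      t = t + part2AltGo ls := by
  induction ls using part2AltGo.induct with
  | case1 a b c rest ih =>
    intro t
    rw [pv_grouped_cons3, List.foldl_cons, part2AltGo]
    rw [pv_step, ih]
    cases (a ++ b ++ c).find? (fun ch =>
        PySem.Set.contains (PySem.Set.inter (PySem.Set.inter (PySem.Set.ofList a) b) c) ch) with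
    | some ch => ring_nf
    | none => ring_nf
  | case2 ls h =>
    intro t
    match ls, h with
    | [], _ => simp [groupedA, part2AltGo]
    | [a], _ => simp [groupedA, part2AltGo]
    | [a, b], _ => simp [groupedA, part2AltGo]
    | a :: b :: c :: rest, h => exact absurd rfl (h a b c rest)

-- ===== VERDICT (by name: the statement is the Claim_ definition above) =====
theorem part2_spec : Claim_equal_part2 := by
  intro lines _ _
  show part2 lines = part2_alt lines
  unfold part2 part2_alt
  rw [pv_main]
  simp
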